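-- pv_equiv track=rewrite | github.com/szpy1950/VisionV2 | cannyMatching.py | find_adjacent_coordinates_to_explore
-- ===== SOURCE A (Python) =====
-- def find_adjacent_coordinates_to_explore(rep_array, placed_pieces):
--     """
--     Find all valid adjacent coordinates to explore next.
--     Returns a list of (row, col) tuples for empty cells adjacent to placed pieces.
--     """
--     rows = len(rep_array)
--     cols = len(rep_array[0])
--
--     # Directions: NORTH, EAST, SOUTH, WEST
--     directions = [(-1, 0), (0, 1), (1, 0), (0, -1)]
--
--     adjacent_coords = set()  # Use set to avoid duplicates
--
--     # Check all placed pieces for adjacent empty cells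
--     for row in range(rows):
--         for col in range(cols):
--             piece_id, rotation = rep_array[row][col]
--
--             # Skip empty cells
--             if piece_id == -1:
--                 continue
--
--             # Check all four directions
--             for dr, dc in directions:
--                 new_row, new_col = row + dr, col + dc
--
--                 # Ensure new coordinates are within bounds
--                 if 0 <= new_row < rows and 0 <= new_col < cols:
--                     # Ensure the cell is empty
--                     if rep_array[new_row][new_col][0] == -1:
--                         adjacent_coords.add((new_row, new_col))
--
--     return list(adjacent_coords)
-- ===== SOURCE B (Python) =====
-- def find_adjacent_coordinates_to_explore(rep_array, placed_pieces):
--     """Row-major scan of EMPTY cells: keep (r, c) iff some in-bounds neighbor holds a placed piece."""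
--     rows = len(rep_array)
--     cols = len(rep_array[0])
--
--     def placed(r, c):
--         return 0 <= r < rows and 0 <= c < cols and rep_array[r][c][0] != -1
--
--     return [(r, c)
--             for r in range(rows)
--             for c in range(cols)
--             if rep_array[r][c][0] == -1
--             and (placed(r - 1, c) or placed(r, c + 1) or placed(r + 1, c) or placed(r, c - 1))]
-- ===== Notes on version B (the rewrite author's own statement) =====
-- stated objective: simpler
-- what changed: Inverts the adjacency scan: instead of iterating placed cells and inserting their empty neighbors into a deduplicating set, B filters the cells directly (keep each empty cell that has a placed in-bounds neighbor), so the set disappears; output order is irrelevant since A returns list(set(...)).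
import Mathlib
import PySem

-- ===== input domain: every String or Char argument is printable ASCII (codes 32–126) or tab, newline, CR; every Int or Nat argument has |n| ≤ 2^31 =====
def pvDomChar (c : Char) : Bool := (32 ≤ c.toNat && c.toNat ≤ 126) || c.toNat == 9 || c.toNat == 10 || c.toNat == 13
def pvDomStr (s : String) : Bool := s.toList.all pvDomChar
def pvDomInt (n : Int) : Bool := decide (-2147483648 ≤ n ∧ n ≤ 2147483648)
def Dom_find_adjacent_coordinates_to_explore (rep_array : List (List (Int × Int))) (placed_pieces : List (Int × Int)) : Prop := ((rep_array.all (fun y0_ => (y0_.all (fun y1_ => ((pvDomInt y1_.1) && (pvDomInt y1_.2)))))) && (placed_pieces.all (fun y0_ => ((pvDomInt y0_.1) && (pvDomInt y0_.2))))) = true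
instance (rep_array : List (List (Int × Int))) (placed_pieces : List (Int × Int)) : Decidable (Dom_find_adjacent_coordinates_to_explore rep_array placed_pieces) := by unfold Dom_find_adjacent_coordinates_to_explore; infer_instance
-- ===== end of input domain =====

-- B inverts the scan (filter empty cells by a placed neighbor instead of collecting placed cells'
-- empty neighbors into a set); objective: simpler. list(set(...))'s iteration order is not modelled:
-- both ports return the lex-sorted element list (outputs are compared as sets).


-- ===== PORT A =====
-- inner loop 'for dr, dc in directions: ...' of A
def pvDirLoop (rep_array : List (List (Int × Int))) (row col : Int) (acc : PySem.Set (Int × Int)) : PySem.Set (Int × Int) :=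
  [((-1 : Int), (0 : Int)), (0, 1), (1, 0), (0, -1)].foldl (fun acc d =>
    if 0 ≤ row + d.1 ∧ row + d.1 < (rep_array.length : Int) ∧
       0 ≤ col + d.2 ∧ col + d.2 < ((PySem.List.pyGetD rep_array 0 []).length : Int) then
      if (PySem.List.pyGetD (PySem.List.pyGetD rep_array (row + d.1) []) (col + d.2) ((-1 : Int), (0 : Int))).1 = -1 then
        PySem.Set.add acc (row + d.1, col + d.2)
      else acc
    else acc) acc

-- middle loop 'for col in range(cols): ...' of A
def pvColLoop (rep_array : List (List (Int × Int))) (row : Int) (acc : PySem.Set (Int × Int)) : PySem.Set (Int × Int) :=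
  (PySem.List.pyRange 0 ((PySem.List.pyGetD rep_array 0 []).length : Int)).foldl (fun acc col =>
    -- piece_id, rotation = rep_array[row][col]; skip empty cells
    if (PySem.List.pyGetD (PySem.List.pyGetD rep_array row []) col ((-1 : Int), (0 : Int))).1 = -1 then acc
    else pvDirLoop rep_array row col acc) acc

-- the set 'adjacent_coords' after A's outer loop 'for row in range(rows): ...'
def pvASet (rep_array : List (List (Int × Int))) : PySem.Set (Int × Int) :=
  (PySem.List.pyRange 0 (rep_array.length : Int)).foldl (fun acc row =>
    pvColLoop rep_array row acc) PySem.Set.empty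

def find_adjacent_coordinates_to_explore (rep_array : List (List (Int × Int))) (placed_pieces : List (Int × Int)) : List (Int × Int) :=
  -- list(adjacent_coords): a Python set's iteration order is not modelled and the result is
  -- compared as a set; ported as the lex-sorted element list of the set.
  PySem.List.sorted2 (pvASet rep_array) (fun p => p.1) (fun p => p.2)

-- ===== PORT B =====
-- helper 'placed(r, c)' of Source B
def pvPlaced (rep_array : List (List (Int × Int))) (r c : Int) : Bool :=
  decide (0 ≤ r) && decide (r < (rep_array.length : Int)) &&
  decide (0 ≤ c) && decide (c < ((PySem.List.pyGetD rep_array 0 []).length : Int)) &&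
  ((PySem.List.pyGetD (PySem.List.pyGetD rep_array r []) c ((-1 : Int), (0 : Int))).1 != -1)

def find_adjacent_coordinates_to_explore_alt (rep_array : List (List (Int × Int))) (placed_pieces : List (Int × Int)) : List (Int × Int) :=
  (PySem.List.pyRange 0 (rep_array.length : Int)).flatMap (fun r =>
    ((PySem.List.pyRange 0 ((PySem.List.pyGetD rep_array 0 []).length : Int)).filter (fun c =>
      ((PySem.List.pyGetD (PySem.List.pyGetD rep_array r []) c ((-1 : Int), (0 : Int))).1 == -1) &&
      (pvPlaced rep_array (r - 1) c || pvPlaced rep_array r (c + 1) ||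
       pvPlaced rep_array (r + 1) c || pvPlaced rep_array r (c - 1)))).map (fun c => (r, c)))

-- ===== PRECONDITION & SPEC =====
-- A raises IndexError iff rep_array is empty (rep_array[0]) or some row is shorter than row 0
-- (rep_array[row][col] for col < cols); Pre_ excludes exactly those inputs.
def Pre_find_adjacent_coordinates_to_explore (rep_array : List (List (Int × Int))) (placed_pieces : List (Int × Int)) : Prop :=
  rep_array ≠ [] ∧ ∀ row ∈ rep_array, (rep_array.headD []).length ≤ row.length
instance (rep_array : List (List (Int × Int))) (placed_pieces : List (Int × Int)) : Decidable (Pre_find_adjacent_coordinates_to_explore rep_array placed_pieces) := by unfold Pre_find_adjacent_coordinates_to_explore; infer_instance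
def pvWitness_find_adjacent_coordinates_to_explore : (List (List (Int × Int))) × (List (Int × Int)) :=
  ([[(0, 0), (-1, 0)], [(-1, 0), (1, 2)]], [(0, 0)])

def Spec_find_adjacent_coordinates_to_explore (rep_array : List (List (Int × Int))) (placed_pieces : List (Int × Int)) (out : List (Int × Int)) : Prop := out = find_adjacent_coordinates_to_explore_alt rep_array placed_pieces
instance (rep_array : List (List (Int × Int))) (placed_pieces : List (Int × Int)) (out : List (Int × Int)) : Decidable (Spec_find_adjacent_coordinates_to_explore rep_array placed_pieces out) := by unfold Spec_find_adjacent_coordinates_to_explore; infer_instance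

-- ===== CLAIM (what is proved, stated in full; the proofs are below) =====
def Claim_equal_find_adjacent_coordinates_to_explore : Prop := ∀ (rep_array : List (List (Int × Int))) (placed_pieces : List (Int × Int)), Dom_find_adjacent_coordinates_to_explore rep_array placed_pieces → Pre_find_adjacent_coordinates_to_explore rep_array placed_pieces → Spec_find_adjacent_coordinates_to_explore rep_array placed_pieces (find_adjacent_coordinates_to_explore rep_array placed_pieces)

-- ===== LEMMAS AND PROOFS =====

-- the first component of rep_array[r][c] under pyGetD's defaults
def pvCell (rep_array : List (List (Int × Int))) (r c : Int) : Int :=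
  (PySem.List.pyGetD (PySem.List.pyGetD rep_array r []) c ((-1 : Int), (0 : Int))).1

-- 'cell (r, c) is in bounds and holds a placed piece'
def pvPlacedP (rep_array : List (List (Int × Int))) (r c : Int) : Prop :=
  0 ≤ r ∧ r < (rep_array.length : Int) ∧ 0 ≤ c ∧ c < ((PySem.List.pyGetD rep_array 0 []).length : Int) ∧
  pvCell rep_array r c ≠ -1

-- 'x is an empty in-bounds cell with a placed in-bounds neighbor' — the set both programs compute
def pvAdjP (rep_array : List (List (Int × Int))) (x : Int × Int) : Prop :=
  0 ≤ x.1 ∧ x.1 < (rep_array.length : Int) ∧ 0 ≤ x.2 ∧ x.2 < ((PySem.List.pyGetD rep_array 0 []).length : Int) ∧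
  pvCell rep_array x.1 x.2 = -1 ∧
  (pvPlacedP rep_array (x.1 - 1) x.2 ∨ pvPlacedP rep_array x.1 (x.2 + 1) ∨
   pvPlacedP rep_array (x.1 + 1) x.2 ∨ pvPlacedP rep_array x.1 (x.2 - 1))

-- the strict comparator sorted2 (key = (fst, snd)) uses
def pvBlex (a b : Int × Int) : Bool :=
  decide (a.1 < b.1) || (!decide (b.1 < a.1) && decide (a.2 < b.2))

def pvLe (a b : Int × Int) : Prop := pvBlex b a = false

lemma pvBlex_iff (a b : Int × Int) : pvBlex a b = true ↔ (a.1 < b.1 ∨ (a.1 = b.1 ∧ a.2 < b.2)) := by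
  simp [pvBlex]; omega

lemma pvLe_iff (a b : Int × Int) : pvLe a b ↔ (a.1 < b.1 ∨ (a.1 = b.1 ∧ a.2 ≤ b.2)) := by
  simp [pvLe, pvBlex]; omega

lemma pvLe_antisymm {a b : Int × Int} (h1 : pvLe a b) (h2 : pvLe b a) : a = b := by
  rw [pvLe_iff] at h1 h2
  have : a.1 = b.1 ∧ a.2 = b.2 := by omega
  exact Prod.ext this.1 this.2

lemma pvLe_trans {a b c : Int × Int} (h1 : pvLe a b) (h2 : pvLe b c) : pvLe a c := by
  rw [pvLe_iff] at h1 h2 ⊢; omega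

lemma pvBlex_le {a b : Int × Int} (h : pvBlex a b = true) : pvLe a b := by
  rw [pvBlex_iff] at h; rw [pvLe_iff]; omega

lemma pvBlex_ne {a b : Int × Int} (h : pvBlex a b = true) : a ≠ b := by
  rw [pvBlex_iff] at h; intro he; subst he; omega


lemma pvCell_ne_congr (a : List (List (Int × Int))) {r c r' c' : Int}
    (h1 : r' = r) (h2 : c' = c) (h : pvCell a r c ≠ -1) : pvCell a r' c' ≠ -1 := by
  subst h1; subst h2; exact h

lemma pvCell_eq_congr (a : List (List (Int × Int))) {r c r' c' : Int}
    (h1 : r' = r) (h2 : c' = c) (h : pvCell a r c = -1) : pvCell a r' c' = -1 := by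
  subst h1; subst h2; exact h

-- generic: membership in a conditional-accumulating foldl
lemma pv_mem_foldl {α β : Type} (step : List β → α → List β) (Q : α → β → Prop)
    (h : ∀ acc i x, x ∈ step acc i ↔ x ∈ acc ∨ Q i x) :
    ∀ (l : List α) (acc : List β) (x : β), x ∈ l.foldl step acc ↔ x ∈ acc ∨ ∃ i ∈ l, Q i x := by
  intro l
  induction l with
  | nil => intro acc x; simp
  | cons i t ih =>
      intro acc x
      simp only [List.foldl_cons, ih, h, List.mem_cons]
      constructor
      · rintro ((hx | hq) | ⟨j, hj, hQ⟩)
        · exact Or.inl hx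
        · exact Or.inr ⟨i, Or.inl rfl, hq⟩
        · exact Or.inr ⟨j, Or.inr hj, hQ⟩
      · rintro (hx | ⟨j, (rfl | hj), hQ⟩)
        · exact Or.inl (Or.inl hx)
        · exact Or.inl (Or.inr hQ)
        · exact Or.inr ⟨j, hj, hQ⟩

-- generic: a property preserved by every step is preserved by the foldl
lemma pv_foldl_preserve {α β : Type} (P : List β → Prop) (step : List β → α → List β)
    (h : ∀ acc i, P acc → P (step acc i)) :
    ∀ (l : List α) (acc : List β), P acc → P (l.foldl step acc) := by
  intro l
  induction l with
  | nil => intro acc hp; simpa using hp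
  | cons i t ih => intro acc hp; exact ih _ (h _ _ hp)

-- membership after the direction loop
lemma pvDirLoop_mem (rep_array : List (List (Int × Int))) (row col : Int)
    (acc : PySem.Set (Int × Int)) (x : Int × Int) :
    x ∈ pvDirLoop rep_array row col acc ↔ x ∈ acc ∨
      ∃ d ∈ [((-1 : Int), (0 : Int)), (0, 1), (1, 0), (0, -1)],
        (0 ≤ row + d.1 ∧ row + d.1 < (rep_array.length : Int) ∧
         0 ≤ col + d.2 ∧ col + d.2 < ((PySem.List.pyGetD rep_array 0 []).length : Int)) ∧
        pvCell rep_array (row + d.1) (col + d.2) = -1 ∧ x = (row + d.1, col + d.2) := by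
  unfold pvDirLoop
  refine pv_mem_foldl _ (fun (d : Int × Int) (x : Int × Int) =>
      (0 ≤ row + d.1 ∧ row + d.1 < (rep_array.length : Int) ∧
       0 ≤ col + d.2 ∧ col + d.2 < ((PySem.List.pyGetD rep_array 0 []).length : Int)) ∧
      pvCell rep_array (row + d.1) (col + d.2) = -1 ∧ x = (row + d.1, col + d.2)) ?_ _ _ _
  intro acc d x
  unfold pvCell
  split_ifs with hb he
  · rw [PySem.Set.mem_add]
    constructor
    · rintro (h | rfl)
      · exact Or.inl h
      · exact Or.inr ⟨hb, he, rfl⟩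
    · rintro (h | ⟨_, _, rfl⟩)
      · exact Or.inl h
      · exact Or.inr rfl
  · constructor
    · exact fun h => Or.inl h
    · rintro (h | ⟨_, he', _⟩); · exact h
      · exact absurd he' he
  · constructor
    · exact fun h => Or.inl h
    · rintro (h | ⟨hb', _, _⟩); · exact h
      · exact absurd hb' hb

-- membership after the column loop
lemma pvColLoop_mem (rep_array : List (List (Int × Int))) (row : Int)
    (acc : PySem.Set (Int × Int)) (x : Int × Int) :
    x ∈ pvColLoop rep_array row acc ↔ x ∈ acc ∨
      ∃ col ∈ PySem.List.pyRange 0 ((PySem.List.pyGetD rep_array 0 []).length : Int),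
        pvCell rep_array row col ≠ -1 ∧
        ∃ d ∈ [((-1 : Int), (0 : Int)), (0, 1), (1, 0), (0, -1)],
          (0 ≤ row + d.1 ∧ row + d.1 < (rep_array.length : Int) ∧
           0 ≤ col + d.2 ∧ col + d.2 < ((PySem.List.pyGetD rep_array 0 []).length : Int)) ∧
          pvCell rep_array (row + d.1) (col + d.2) = -1 ∧ x = (row + d.1, col + d.2) := by
  unfold pvColLoop
  refine pv_mem_foldl _ (fun (col : Int) (x : Int × Int) =>
      pvCell rep_array row col ≠ -1 ∧
      ∃ d ∈ [((-1 : Int), (0 : Int)), (0, 1), (1, 0), (0, -1)],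
        (0 ≤ row + d.1 ∧ row + d.1 < (rep_array.length : Int) ∧
         0 ≤ col + d.2 ∧ col + d.2 < ((PySem.List.pyGetD rep_array 0 []).length : Int)) ∧
        pvCell rep_array (row + d.1) (col + d.2) = -1 ∧ x = (row + d.1, col + d.2)) ?_ _ _ _
  intro acc col x
  by_cases hskip : (PySem.List.pyGetD (PySem.List.pyGetD rep_array row []) col ((-1 : Int), (0 : Int))).1 = -1
  · rw [if_pos hskip]
    constructor
    · exact fun h => Or.inl h
    · rintro (h | ⟨hne, _⟩)
      · exact h
      · exact absurd hskip hne
  · rw [if_neg hskip]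
    rw [pvDirLoop_mem]
    constructor
    · rintro (h | ⟨d, hd, h2⟩)
      · exact Or.inl h
      · exact Or.inr ⟨hskip, d, hd, h2⟩
    · rintro (h | ⟨_, d, hd, h2⟩)
      · exact Or.inl h
      · exact Or.inr ⟨d, hd, h2⟩

-- membership in A's set is exactly pvAdjP
lemma pvASet_mem (rep_array : List (List (Int × Int))) (x : Int × Int) :
    x ∈ pvASet rep_array ↔ pvAdjP rep_array x := by
  unfold pvASet
  rw [pv_mem_foldl _ (fun row x =>
        ∃ col ∈ PySem.List.pyRange 0 ((PySem.List.pyGetD rep_array 0 []).length : Int),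
          pvCell rep_array row col ≠ -1 ∧
          ∃ d ∈ [((-1 : Int), (0 : Int)), (0, 1), (1, 0), (0, -1)],
            (0 ≤ row + d.1 ∧ row + d.1 < (rep_array.length : Int) ∧
             0 ≤ col + d.2 ∧ col + d.2 < ((PySem.List.pyGetD rep_array 0 []).length : Int)) ∧
            pvCell rep_array (row + d.1) (col + d.2) = -1 ∧ x = (row + d.1, col + d.2))
      (fun acc row x => pvColLoop_mem rep_array row acc x)]
  simp only [PySem.Set.empty, List.not_mem_nil, false_or]
  constructor
  · rintro ⟨row, hrow, col, hcol, hplaced, d, hd, hb, hemp, rfl⟩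
    rw [PySem.List.mem_pyRange_one] at hrow hcol
    refine ⟨hb.1, hb.2.1, hb.2.2.1, hb.2.2.2, hemp, ?_⟩
    have pe := fun {r' c' : Int} (h1 : r' = row) (h2 : c' = col) =>
      pvCell_ne_congr rep_array h1 h2 hplaced
    fin_cases hd <;> simp only []
    · -- d = (-1, 0): placed neighbor below
      exact Or.inr (Or.inr (Or.inl
        ⟨by omega, by omega, by omega, by omega, pe (by omega) (by omega)⟩))
    · -- d = (0, 1): placed neighbor to the left
      exact Or.inr (Or.inr (Or.inr
        ⟨by omega, by omega, by omega, by omega, pe (by omega) (by omega)⟩))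
    · -- d = (1, 0): placed neighbor above
      exact Or.inl ⟨by omega, by omega, by omega, by omega, pe (by omega) (by omega)⟩
    · -- d = (0, -1): placed neighbor to the right
      exact Or.inr (Or.inl
        ⟨by omega, by omega, by omega, by omega, pe (by omega) (by omega)⟩)
  · rintro ⟨h1, h2, h3, h4, hemp, hnb⟩
    rcases hnb with hp | hp | hp | hp
    · -- neighbor (x.1 - 1, x.2) placed: reached with d = (1, 0)
      refine ⟨x.1 - 1, ?_, x.2, ?_, hp.2.2.2.2, (1, 0), by simp, ⟨by omega, by omega, by omega, by omega⟩, ?_, ?_⟩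
      · rw [PySem.List.mem_pyRange_one]; exact ⟨hp.1, hp.2.1⟩
      · rw [PySem.List.mem_pyRange_one]; exact ⟨hp.2.2.1, hp.2.2.2.1⟩
      · exact pvCell_eq_congr rep_array (by omega) (by omega) hemp
      · exact (Prod.ext (by omega) (by omega) : _ = x).symm
    · -- neighbor (x.1, x.2 + 1) placed: reached with d = (0, -1)
      refine ⟨x.1, ?_, x.2 + 1, ?_, hp.2.2.2.2, (0, -1), by simp, ⟨by omega, by omega, by omega, by omega⟩, ?_, ?_⟩
      · rw [PySem.List.mem_pyRange_one]; exact ⟨hp.1, hp.2.1⟩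
      · rw [PySem.List.mem_pyRange_one]; exact ⟨hp.2.2.1, hp.2.2.2.1⟩
      · exact pvCell_eq_congr rep_array (by omega) (by omega) hemp
      · exact (Prod.ext (by omega) (by omega) : _ = x).symm
    · -- neighbor (x.1 + 1, x.2) placed: reached with d = (-1, 0)
      refine ⟨x.1 + 1, ?_, x.2, ?_, hp.2.2.2.2, (-1, 0), by simp, ⟨by omega, by omega, by omega, by omega⟩, ?_, ?_⟩
      · rw [PySem.List.mem_pyRange_one]; exact ⟨hp.1, hp.2.1⟩
      · rw [PySem.List.mem_pyRange_one]; exact ⟨hp.2.2.1, hp.2.2.2.1⟩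
      · exact pvCell_eq_congr rep_array (by omega) (by omega) hemp
      · exact (Prod.ext (by omega) (by omega) : _ = x).symm
    · -- neighbor (x.1, x.2 - 1) placed: reached with d = (0, 1)
      refine ⟨x.1, ?_, x.2 - 1, ?_, hp.2.2.2.2, (0, 1), by simp, ⟨by omega, by omega, by omega, by omega⟩, ?_, ?_⟩
      · rw [PySem.List.mem_pyRange_one]; exact ⟨hp.1, hp.2.1⟩
      · rw [PySem.List.mem_pyRange_one]; exact ⟨hp.2.2.1, hp.2.2.2.1⟩
      · exact pvCell_eq_congr rep_array (by omega) (by omega) hemp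
      · exact (Prod.ext (by omega) (by omega) : _ = x).symm

-- A's set has no duplicates
lemma pvASet_nodup (rep_array : List (List (Int × Int))) : (pvASet rep_array).Nodup := by
  unfold pvASet
  refine pv_foldl_preserve List.Nodup _ ?_ _ _ (by simp [PySem.Set.empty])
  intro acc row hacc
  unfold pvColLoop
  refine pv_foldl_preserve List.Nodup _ ?_ _ _ hacc
  intro acc col hacc
  split_ifs
  · exact hacc
  · unfold pvDirLoop
    refine pv_foldl_preserve List.Nodup _ ?_ _ _ hacc
    intro acc d hacc
    split_ifs
    · exact PySem.Set.nodup_add _ _ hacc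
    · exact hacc
    · exact hacc

-- membership in B's list is exactly pvAdjP
lemma pvB_mem (rep_array : List (List (Int × Int))) (placed_pieces : List (Int × Int)) (x : Int × Int) :
    x ∈ find_adjacent_coordinates_to_explore_alt rep_array placed_pieces ↔ pvAdjP rep_array x := by
  unfold find_adjacent_coordinates_to_explore_alt pvAdjP pvPlacedP
  simp only [List.mem_flatMap, List.mem_map, List.mem_filter, PySem.List.mem_pyRange_one,
    pvPlaced, pvCell, Bool.and_eq_true, Bool.or_eq_true, beq_iff_eq, bne_iff_ne, ne_eq,
    decide_eq_true_eq]
  constructor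
  · rintro ⟨r, hr, c, ⟨hc, hemp, hnb⟩, rfl⟩
    refine ⟨hr.1, hr.2, hc.1, hc.2, hemp, ?_⟩
    rcases hnb with ((h | h) | h) | h
    · exact Or.inl ⟨h.1.1.1.1, h.1.1.1.2, h.1.1.2, h.1.2, h.2⟩
    · exact Or.inr (Or.inl ⟨h.1.1.1.1, h.1.1.1.2, h.1.1.2, h.1.2, h.2⟩)
    · exact Or.inr (Or.inr (Or.inl ⟨h.1.1.1.1, h.1.1.1.2, h.1.1.2, h.1.2, h.2⟩))
    · exact Or.inr (Or.inr (Or.inr ⟨h.1.1.1.1, h.1.1.1.2, h.1.1.2, h.1.2, h.2⟩))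
  · rintro ⟨h1, h2, h3, h4, hemp, hnb⟩
    refine ⟨x.1, ⟨h1, h2⟩, x.2, ⟨⟨h3, h4⟩, hemp, ?_⟩, rfl⟩
    rcases hnb with h | h | h | h
    · exact Or.inl (Or.inl (Or.inl ⟨⟨⟨⟨h.1, h.2.1⟩, h.2.2.1⟩, h.2.2.2.1⟩, h.2.2.2.2⟩))
    · exact Or.inl (Or.inl (Or.inr ⟨⟨⟨⟨h.1, h.2.1⟩, h.2.2.1⟩, h.2.2.2.1⟩, h.2.2.2.2⟩))
    · exact Or.inl (Or.inr ⟨⟨⟨⟨h.1, h.2.1⟩, h.2.2.1⟩, h.2.2.2.1⟩, h.2.2.2.2⟩)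
    · exact Or.inr ⟨⟨⟨⟨h.1, h.2.1⟩, h.2.2.1⟩, h.2.2.2.1⟩, h.2.2.2.2⟩

-- B's list is strictly lex-increasing
lemma pvB_pairwise (rep_array : List (List (Int × Int))) (placed_pieces : List (Int × Int)) :
    (find_adjacent_coordinates_to_explore_alt rep_array placed_pieces).Pairwise
      (fun a b => pvBlex a b = true) := by
  unfold find_adjacent_coordinates_to_explore_alt
  rw [List.pairwise_flatMap]
  have hrange : ∀ (n : Int), (PySem.List.pyRange 0 n).Pairwise (fun a b => a < b) := by
    intro n
    rcases Int.le_total n 0 with h | h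
    · have : PySem.List.pyRange 0 n = [] := by
        apply List.eq_nil_iff_forall_not_mem.mpr
        intro a ha; rw [PySem.List.mem_pyRange_one] at ha; omega
      rw [this]; exact List.Pairwise.nil
    · obtain ⟨m, rfl⟩ := Int.eq_ofNat_of_zero_le h
      rw [PySem.List.pyRange_zero_natCast, List.pairwise_map]
      exact List.pairwise_lt_range.imp (by intro a b h; exact_mod_cast h)
  constructor
  · intro r _
    rw [List.pairwise_map]
    refine ((hrange _).filter _).imp ?_
    intro a b hab
    rw [pvBlex_iff]; right; exact ⟨rfl, hab⟩
  · refine (hrange _).imp ?_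
    intro r1 r2 h12 x hx y hy
    obtain ⟨c1, _, rfl⟩ := List.mem_map.mp hx
    obtain ⟨c2, _, rfl⟩ := List.mem_map.mp hy
    rw [pvBlex_iff]; left; exact h12

-- insertion with sorted2's comparator keeps the list pvLe-sorted
lemma pv_insertBy_pairwise (x : Int × Int) (acc : List (Int × Int))
    (h : acc.Pairwise pvLe) : (PySem.List.insertBy pvBlex x acc).Pairwise pvLe := by
  induction acc with
  | nil => simp [PySem.List.insertBy]
  | cons y ys ih =>
      rw [List.pairwise_cons] at h
      by_cases hxy : pvBlex x y = true
      · rw [show PySem.List.insertBy pvBlex x (y :: ys) = x :: y :: ys by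
            simp [PySem.List.insertBy, hxy]]
        rw [List.pairwise_cons]
        refine ⟨?_, List.pairwise_cons.mpr h⟩
        intro z hz
        rcases List.mem_cons.mp hz with rfl | hz'
        · exact pvBlex_le hxy
        · exact pvLe_trans (pvBlex_le hxy) (h.1 z hz')
      · rw [show PySem.List.insertBy pvBlex x (y :: ys) = y :: PySem.List.insertBy pvBlex x ys by
            simp [PySem.List.insertBy, hxy]]
        rw [List.pairwise_cons]
        refine ⟨?_, ih h.2⟩
        intro z hz
        rcases (PySem.List.mem_insertBy pvBlex x z ys).mp hz with rfl | hz'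
        · exact Bool.eq_false_iff.mpr hxy
        · exact h.1 z hz'

-- sorted2 with keys (fst, snd) produces a pvLe-sorted list
lemma pv_sorted2_pairwise (xs : List (Int × Int)) :
    (PySem.List.sorted2 xs (fun p => p.1) (fun p => p.2)).Pairwise pvLe := by
  have : PySem.List.sorted2 xs (fun p => p.1) (fun p => p.2) =
      xs.foldl (fun acc x => PySem.List.insertBy pvBlex x acc) [] := rfl
  rw [this]
  refine pv_foldl_preserve (List.Pairwise pvLe) _ ?_ _ _ List.Pairwise.nil
  intro acc x hacc
  exact pv_insertBy_pairwise x acc hacc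

-- ===== VERDICT (by name: the statement is the Claim_ definition above) =====
theorem find_adjacent_coordinates_to_explore_spec : Claim_equal_find_adjacent_coordinates_to_explore := by
  intro rep_array placed_pieces _hdom _hpre
  unfold Spec_find_adjacent_coordinates_to_explore
  unfold find_adjacent_coordinates_to_explore
  have hperm : (PySem.List.sorted2 (pvASet rep_array) (fun p => p.1) (fun p => p.2)).Perm
      (find_adjacent_coordinates_to_explore_alt rep_array placed_pieces) := by
    refine (PySem.List.sorted2_perm _ _ _ _).trans ?_
    rw [List.perm_ext_iff_of_nodup (pvASet_nodup rep_array) ?nodupB]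
    · intro a
      rw [pvASet_mem, pvB_mem]
    · exact (pvB_pairwise rep_array placed_pieces).imp (fun h => pvBlex_ne h)
  exact List.Perm.eq_of_pairwise (fun a b _ _ h1 h2 => pvLe_antisymm h1 h2)
    (pv_sorted2_pairwise _)
    ((pvB_pairwise rep_array placed_pieces).imp (fun h => pvBlex_le h))
    hperm
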